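-- pv_equiv track=rewrite | github.com/kebaHailu/A2SV_programming | reducing-dishes.py | maxSatisfaction
-- ===== SOURCE A (Python) =====
-- from typing import List
--
-- def maxSatisfaction(satisfaction: List[int]) -> int:
--     satisfaction.sort()
--
--     prefix = 0
--     tot = 0
--
--     for i in range(len(satisfaction)-1,-1,-1):
--         prefix += satisfaction[i]
--
--         if prefix >= 0:
--             tot += prefix
--
--     return tot
-- ===== SOURCE B (Python) =====
-- from typing import List
--
-- def maxSatisfaction(satisfaction: List[int]) -> int:
--     satisfaction.sort()
--     n = len(satisfaction)
--     best = 0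
--     for k in range(n + 1):
--         w = 0
--         for j, v in enumerate(satisfaction[n - k:]):
--             w += (j + 1) * v
--         best = max(best, w)
--     return best
-- ===== Notes on version B (the rewrite author's own statement) =====
-- stated objective: alternative
-- what changed: Replaces A's single backward pass accumulating suffix sums and adding the nonnegative ones with an explicit brute-force search over the number k of dishes to cook (0..n), computing each weighted sum over the top-k suffix directly and taking the maximum.
import Mathlib
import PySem

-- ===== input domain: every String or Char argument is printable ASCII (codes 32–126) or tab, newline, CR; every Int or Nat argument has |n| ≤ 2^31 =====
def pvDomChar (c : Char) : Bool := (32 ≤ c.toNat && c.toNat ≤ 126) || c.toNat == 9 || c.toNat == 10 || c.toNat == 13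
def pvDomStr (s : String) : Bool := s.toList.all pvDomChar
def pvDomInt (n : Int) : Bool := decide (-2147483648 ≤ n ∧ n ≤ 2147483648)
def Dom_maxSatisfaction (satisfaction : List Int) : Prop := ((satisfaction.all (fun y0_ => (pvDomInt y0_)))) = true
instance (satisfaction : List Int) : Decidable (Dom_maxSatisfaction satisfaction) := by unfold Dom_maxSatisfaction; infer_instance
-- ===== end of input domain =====

-- B replaces A's single backward greedy pass with a brute-force maximum over all suffix lengths
-- (alternative decomposition, not faster). A sorts its argument in place; the equivalence proved
-- here is about the return value (B performs the same in-place sort).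

-- ===== PORT A =====
def maxSatisfaction (satisfaction : List Int) : Int :=
  let xs := PySem.List.sorted satisfaction (fun v => v) false
  let r := (PySem.List.pyRange ((xs.length : Int) - 1) (-1) (-1)).foldl
    (fun (s : Int × Int) i =>
      let pre := s.1 + PySem.List.pyGetD xs i 0
      (pre, if 0 ≤ pre then s.2 + pre else s.2)) (0, 0)
  r.2

-- ===== PORT B =====
def maxSatisfaction_alt (satisfaction : List Int) : Int :=
  let xs := PySem.List.sorted satisfaction (fun v => v) false
  let n : Int := xs.length
  (PySem.List.pyRange 0 (n + 1) 1).foldl (fun best k =>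
    let w := (PySem.List.enumerate (PySem.List.slice xs (some (n - k)) none) 0).foldl
      (fun w p => w + (p.1 + 1) * p.2) 0
    max best w) 0

-- ===== PRECONDITION & SPEC =====
def Spec_maxSatisfaction (satisfaction : List Int) (out : Int) : Prop := out = maxSatisfaction_alt satisfaction
instance (satisfaction : List Int) (out : Int) : Decidable (Spec_maxSatisfaction satisfaction out) := by unfold Spec_maxSatisfaction; infer_instance

-- ===== CLAIM (what is proved, stated in full; the proofs are below) =====
def Claim_equal_maxSatisfaction : Prop := ∀ (satisfaction : List Int), Dom_maxSatisfaction satisfaction → Spec_maxSatisfaction satisfaction (maxSatisfaction satisfaction)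

-- ===== LEMMAS AND PROOFS =====

-- A's loop body on values (prefix, tot)
def pvStep (s : Int × Int) (x : Int) : Int × Int :=
  let pre := s.1 + x
  (pre, if 0 ≤ pre then s.2 + pre else s.2)

-- A's backward index loop as a structural foldr over the list
def pvGsim (t : List Int) : Int × Int := t.foldr (fun x s => pvStep s x) (0, 0)

theorem pvGsim_nil : pvGsim [] = (0, 0) := rfl
theorem pvGsim_cons (y : Int) (r : List Int) : pvGsim (y :: r) = pvStep (pvGsim r) y := rfl

-- B's inner weighted sum over a suffix
def pvE (u : List Int) : Int :=
  (PySem.List.enumerate u 0).foldl (fun w p => w + (p.1 + 1) * p.2) 0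

-- B's outer loop on a list
def pvBloop (t : List Int) : Int :=
  (PySem.List.pyRange 0 ((t.length : Int) + 1) 1).foldl (fun best k =>
    max best (pvE (PySem.List.slice t (some ((t.length : Int) - k)) none))) 0

theorem pv_foldl_congr {α β : Type} (l : List α) (f g : β → α → β) (init : β)
    (h : ∀ b a, a ∈ l → f b a = g b a) : l.foldl f init = l.foldl g init := by
  induction l generalizing init with
  | nil => rfl
  | cons x t ih =>
    simp only [List.foldl_cons]
    rw [h init x (by simp)]
    exact ih _ (fun b a ha => h b a (by simp [ha]))

theorem pvGsim_fst (t : List Int) : (pvGsim t).1 = t.sum := by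
  induction t with
  | nil => rfl
  | cons y r ih =>
    rw [pvGsim_cons]
    simp only [pvStep, List.sum_cons]
    omega

theorem pv_bridgeA (t : List Int) (init : Int × Int) :
    (PySem.List.pyRange ((t.length : Int) - 1) (-1) (-1)).foldl
      (fun s i => pvStep s (PySem.List.pyGetD t i 0)) init
    = t.foldr (fun x s => pvStep s x) init := by
  induction t using List.reverseRecOn generalizing init with
  | nil => simp [PySem.List.pyRange_neg_one_eq_nil]
  | append_singleton r x ih =>
    have hlen : ((r ++ [x]).length : Int) - 1 = (r.length : Int) := by
      simp
    rw [hlen, PySem.List.pyRange_neg_one_cons (by omega : (-1 : Int) < r.length)]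
    rw [List.foldl_cons]
    have hlast : PySem.List.pyGetD (r ++ [x]) (r.length : Int) 0 = x := by
      rw [PySem.List.pyGetD_natCast]
      simp [List.getD_eq_getElem?_getD]
    rw [hlast]
    have hbody : (PySem.List.pyRange ((r.length : Int) - 1) (-1) (-1)).foldl
        (fun s i => pvStep s (PySem.List.pyGetD (r ++ [x]) i 0)) (pvStep init x)
        = (PySem.List.pyRange ((r.length : Int) - 1) (-1) (-1)).foldl
        (fun s i => pvStep s (PySem.List.pyGetD r i 0)) (pvStep init x) := by
      apply pv_foldl_congr
      intro b i hi
      rw [PySem.List.mem_pyRange_neg_one] at hi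
      have h0 : 0 ≤ i := by omega
      have h1 : i < (r.length : Int) := by omega
      have h2 : i < ((r ++ [x]).length : Int) := by simp; omega
      rw [PySem.List.pyGetD_eq_getElem (r ++ [x]) 0 h0 h2, PySem.List.pyGetD_eq_getElem r 0 h0 h1]
      rw [List.getElem_append_left]
    rw [hbody, ih (pvStep init x), List.foldr_append]
    rfl

theorem pvE_sum_shift (u : List Int) (s c : Int) :
    (PySem.List.enumerate u s).foldl (fun w p => w + (p.1 + 1) * p.2) c
      = c + ((PySem.List.enumerate u s).map (fun p => (p.1 + 1) * p.2)).sum := by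
  induction u generalizing s c with
  | nil => simp [PySem.List.enumerate_nil]
  | cons y r ih =>
    rw [PySem.List.enumerate_cons]
    simp only [List.foldl_cons, List.map_cons, List.sum_cons]
    rw [ih]
    ring

theorem pvE_enum_start (u : List Int) (s : Int) :
    ((PySem.List.enumerate u (s + 1)).map (fun p => (p.1 + 1) * p.2)).sum
      = ((PySem.List.enumerate u s).map (fun p => (p.1 + 1) * p.2)).sum + u.sum := by
  induction u generalizing s with
  | nil => simp [PySem.List.enumerate_nil]
  | cons y r ih =>
    rw [PySem.List.enumerate_cons, PySem.List.enumerate_cons]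
    simp only [List.map_cons, List.sum_cons]
    rw [ih]
    ring

theorem pvE_nil : pvE [] = 0 := by
  simp [pvE, PySem.List.enumerate_nil]

theorem pvE_cons (y : Int) (r : List Int) : pvE (y :: r) = y + r.sum + pvE r := by
  unfold pvE
  rw [PySem.List.enumerate_cons]
  simp only [List.foldl_cons]
  rw [pvE_sum_shift, pvE_sum_shift, pvE_enum_start]
  ring

theorem pvBloop_nil : pvBloop [] = 0 := by
  unfold pvBloop
  have h : PySem.List.pyRange 0 (((List.length ([] : List Int)) : Int) + 1) 1 = [0] := by
    simpa using PySem.List.pyRange_one_singleton (a := 0)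
  rw [h]
  simp only [List.foldl_cons, List.foldl_nil]
  rw [PySem.List.slice_from ([] : List Int) (by simp : (0:Int) ≤ ((List.length ([] : List Int)) : Int) - 0)]
  simp [pvE_nil]

theorem pvBloop_cons (y : Int) (r : List Int) :
    pvBloop (y :: r) = max (pvBloop r) (pvE (y :: r)) := by
  unfold pvBloop
  have hlen : (((y :: r).length : Int)) = (r.length : Int) + 1 := by simp
  rw [hlen]
  rw [PySem.List.pyRange_one_succ_right (by omega : (0:Int) ≤ (r.length : Int) + 1)]
  rw [List.foldl_append]
  simp only [List.foldl_cons, List.foldl_nil]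
  have hfull : PySem.List.slice (y :: r) (some ((r.length : Int) + 1 - ((r.length : Int) + 1))) none = y :: r := by
    have : ((r.length : Int) + 1 - ((r.length : Int) + 1)) = 0 := by omega
    rw [this, PySem.List.slice_from (y :: r) (by omega : (0:Int) ≤ 0)]
    simp
  rw [hfull]
  congr 1
  apply pv_foldl_congr
  intro b k hk
  rw [PySem.List.mem_pyRange_one] at hk
  congr 1
  have h1 : (0:Int) ≤ (r.length : Int) + 1 - k := by omega
  have h2 : (0:Int) ≤ (r.length : Int) - k := by omega
  rw [PySem.List.slice_from (y :: r) h1, PySem.List.slice_from r h2]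
  have h3 : ((r.length : Int) + 1 - k).toNat = ((r.length : Int) - k).toNat + 1 := by omega
  rw [h3]
  simp [List.drop_succ_cons]

theorem pvE_le_pvBloop (t : List Int) : pvE t ≤ pvBloop t := by
  cases t with
  | nil => simp [pvBloop_nil, pvE_nil]
  | cons y r => rw [pvBloop_cons]; exact le_max_right _ _

theorem pv_sum_r_nonneg (y : Int) (r : List Int) (hy : ∀ z ∈ r, y ≤ z)
    (h0 : 0 ≤ y + r.sum) : 0 ≤ r.sum := by
  by_cases hneg : y ≤ 0
  · omega
  · exact List.sum_nonneg (fun z hz => le_of_lt (lt_of_lt_of_le (by omega) (hy z hz)))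

theorem pvL (t : List Int) (hs : t.Pairwise (· ≤ ·)) (h0 : 0 ≤ t.sum) :
    (pvGsim t).2 = pvE t := by
  induction t with
  | nil => rw [pvGsim_nil, pvE_nil]
  | cons y r ih =>
    have hr : r.Pairwise (· ≤ ·) := (List.pairwise_cons.mp hs).2
    have hy : ∀ z ∈ r, y ≤ z := (List.pairwise_cons.mp hs).1
    have hsum : (y :: r).sum = y + r.sum := by simp
    have h0r : 0 ≤ r.sum := pv_sum_r_nonneg y r hy (by omega)
    rw [pvGsim_cons]
    simp only [pvStep]
    rw [pvGsim_fst]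
    rw [if_pos (by omega : 0 ≤ r.sum + y)]
    rw [pvE_cons, ih hr h0r]
    ring

theorem pvM (t : List Int) (hs : t.Pairwise (· ≤ ·)) : (pvGsim t).2 = pvBloop t := by
  induction t with
  | nil => rw [pvGsim_nil, pvBloop_nil]
  | cons y r ih =>
    have hr : r.Pairwise (· ≤ ·) := (List.pairwise_cons.mp hs).2
    have hy : ∀ z ∈ r, y ≤ z := (List.pairwise_cons.mp hs).1
    rw [pvBloop_cons, pvE_cons, ← ih hr]
    rw [pvGsim_cons]
    simp only [pvStep]
    rw [pvGsim_fst]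
    by_cases hS : 0 ≤ r.sum + y
    · rw [if_pos hS]
      have h0r : 0 ≤ r.sum := pv_sum_r_nonneg y r hy (by omega)
      rw [pvL r hr h0r]
      have : max (pvE r) (y + r.sum + pvE r) = y + r.sum + pvE r := by
        apply max_eq_right; omega
      rw [this]; ring
    · rw [if_neg hS]
      have hle : y + r.sum + pvE r ≤ (pvGsim r).2 := by
        have h1 := pvE_le_pvBloop r
        have h2 : pvBloop r = (pvGsim r).2 := (ih hr).symm
        omega
      exact (max_eq_left hle).symm

-- ===== VERDICT (by name: the statement is the Claim_ definition above) =====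
theorem maxSatisfaction_spec : Claim_equal_maxSatisfaction := by
  intro satisfaction _
  unfold Spec_maxSatisfaction
  show maxSatisfaction satisfaction = maxSatisfaction_alt satisfaction
  unfold maxSatisfaction maxSatisfaction_alt
  show ((PySem.List.pyRange (((PySem.List.sorted satisfaction (fun v => v) false).length : Int) - 1) (-1) (-1)).foldl
      (fun s i => pvStep s (PySem.List.pyGetD (PySem.List.sorted satisfaction (fun v => v) false) i 0)) (0, 0)).2
    = pvBloop (PySem.List.sorted satisfaction (fun v => v) false)
  rw [pv_bridgeA]
  exact pvM _ (by simpa using PySem.List.sorted_pairwise satisfaction (fun v => v))
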